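-- pv_equiv track=rewrite | github.com/vicktor111/Graphs | graphs.py | create_num_float
-- ===== SOURCE A (Python) =====
-- def create_num_float(num):
--     a = 0
--     b = 0
--     for _ in range(num):
--         if b >= 9:
--             a += 1
--             b = 0
--         else:
--             b += 1
--         yield f" {a}.{b} "
-- ===== SOURCE B (Python) =====
-- def create_num_float(num):
--     # stateless: the k-th yielded string (k = 1..num) is " k//10 . k%10 "
--     for i in range(num):
--         k = i + 1
--         yield f" {k // 10}.{k % 10} "
-- ===== Notes on version B (the rewrite author's own statement) =====
-- stated objective: simpler
-- what changed: B drops A's two stateful accumulators and the carry branch and instead computes each yielded digit pair directly from the loop index by closed-form divmod.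
import Mathlib
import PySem

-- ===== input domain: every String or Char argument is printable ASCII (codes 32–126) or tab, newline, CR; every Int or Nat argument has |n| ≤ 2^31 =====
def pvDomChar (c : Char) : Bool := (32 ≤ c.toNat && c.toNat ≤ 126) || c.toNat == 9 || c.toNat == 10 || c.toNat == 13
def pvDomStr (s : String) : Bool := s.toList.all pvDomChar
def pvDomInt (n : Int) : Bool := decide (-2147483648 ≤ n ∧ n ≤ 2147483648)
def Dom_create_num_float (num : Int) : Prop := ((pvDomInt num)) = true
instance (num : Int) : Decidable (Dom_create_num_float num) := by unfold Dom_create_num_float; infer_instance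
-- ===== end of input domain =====

-- B replaces A's stateful accumulators a,b and carry branch by closed-form divmod on the loop index (same cost; return value = generator's yielded list).

-- ===== PORT A =====
-- one loop iteration: update the (a, b) carry state, then yield " a.b "
def pvStepA (s : (Int × Int) × List String) (_ : Int) : (Int × Int) × List String :=
  let ((a, b), out) := s
  if b ≥ 9 then
    ((a + 1, 0), out ++ [" " ++ PySem.Int.toStr (a + 1) ++ "." ++ PySem.Int.toStr 0 ++ " "])
  else
    ((a, b + 1), out ++ [" " ++ PySem.Int.toStr a ++ "." ++ PySem.Int.toStr (b + 1) ++ " "])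

def create_num_float (num : Int) : List String :=
  ((PySem.List.pyRange 0 num 1).foldl pvStepA ((0, 0), [])).2

-- ===== PORT B =====
def pvFmtB (k : Int) : String :=
  " " ++ PySem.Int.toStr (PySem.Int.floordiv k 10) ++ "." ++ PySem.Int.toStr (PySem.Int.mod k 10) ++ " "

def create_num_float_alt (num : Int) : List String :=
  (PySem.List.pyRange 0 num 1).map (fun i => pvFmtB (i + 1))

-- ===== PRECONDITION & SPEC =====
def Spec_create_num_float (num : Int) (out : List String) : Prop := out = create_num_float_alt num
instance (num : Int) (out : List String) : Decidable (Spec_create_num_float num out) := by unfold Spec_create_num_float; infer_instance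

-- ===== CLAIM (what is proved, stated in full; the proofs are below) =====
def Claim_equal_create_num_float : Prop := ∀ (num : Int), Dom_create_num_float num → Spec_create_num_float num (create_num_float num)

-- ===== LEMMAS AND PROOFS =====

-- loop invariant: after n iterations A's state is (n/10, n%10) and the output so far is B's output
theorem pvLoopA (n : Nat) :
    (PySem.List.pyRange 0 (n : Int) 1).foldl pvStepA ((0, 0), []) =
      ((((n / 10 : Nat) : Int), ((n % 10 : Nat) : Int)),
        (PySem.List.pyRange 0 (n : Int) 1).map (fun i => pvFmtB (i + 1))) := by
  induction n with
  | zero => simp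
  | succ n ih =>
    have h : ((n + 1 : Nat) : Int) = (n : Int) + 1 := by push_cast; ring
    rw [h, PySem.List.pyRange_one_succ_right (by exact_mod_cast Nat.zero_le n)]
    rw [List.foldl_append, ih, List.map_append]
    simp only [List.foldl_cons, List.foldl_nil, List.map_cons, List.map_nil, pvStepA, pvFmtB]
    have hfd : PySem.Int.floordiv ((n : Int) + 1) 10 = (((n + 1) / 10 : Nat) : Int) := by
      rw [show ((n : Int) + 1) = ((n + 1 : Nat) : Int) by push_cast; ring]
      exact_mod_cast PySem.Int.floordiv_natCast (n + 1) 10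
    have hmd : PySem.Int.mod ((n : Int) + 1) 10 = (((n + 1) % 10 : Nat) : Int) := by
      rw [show ((n : Int) + 1) = ((n + 1 : Nat) : Int) by push_cast; ring]
      exact_mod_cast PySem.Int.mod_natCast (n + 1) 10
    by_cases hb : ((n % 10 : Nat) : Int) ≥ 9
    · have h9 : n % 10 = 9 := by omega
      have ha : ((n / 10 : Nat) : Int) + 1 = (((n + 1) / 10 : Nat) : Int) := by
        have : (n + 1) / 10 = n / 10 + 1 := by omega
        push_cast [this]; ring
      have hb0 : (0 : Int) = (((n + 1) % 10 : Nat) : Int) := by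
        have : (n + 1) % 10 = 0 := by omega
        simp [this]
      simp only [if_pos hb, hfd, hmd, ← ha, ← hb0]
    · have h9 : n % 10 ≠ 9 := by omega
      have ha : ((n / 10 : Nat) : Int) = (((n + 1) / 10 : Nat) : Int) := by
        have : (n + 1) / 10 = n / 10 := by omega
        rw [this]
      have hbb : ((n % 10 : Nat) : Int) + 1 = (((n + 1) % 10 : Nat) : Int) := by
        have : (n + 1) % 10 = n % 10 + 1 := by omega
        push_cast [this]; ring
      simp only [if_neg hb, hfd, hmd, ← ha, ← hbb]

-- ===== VERDICT (by name: the statement is the Claim_ definition above) =====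
theorem create_num_float_spec : Claim_equal_create_num_float := by
  intro num _
  unfold Spec_create_num_float create_num_float create_num_float_alt
  by_cases h : num ≤ 0
  · rw [PySem.List.pyRange_one_eq_nil h]; rfl
  · have hn : num = (num.toNat : Int) := (Int.toNat_of_nonneg (by omega)).symm
    rw [hn, pvLoopA]
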